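-- pv_equiv track=rewrite | github.com/vijethkash123/DSAPractice | Interview questions/AmazonInterviewQ1.py | chooseFleets
-- ===== SOURCE A (Python) =====
-- def chooseFleets(wheels):
--     result = []
--     for i in range(len(wheels)):
--         count = 0  # Number of ways
--         x = wheels[i]//2+1 #number of 2 wheelers + 1 because range(3) for wheels[i] = 2 iterates fro  0 to 2
--         for j in range(x): # we iterate through number of two wheelers choosed within wheels count for each item in wheels(first loop)
--             twowheeled = j
--             fourwheeled = (wheels[i]- (j*2))//4  # checking how many four wheelers we can select after subtracting number of 2 wheelers from available number of wheels and // by 4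
--             if 2*twowheeled + 4*fourwheeled == wheels[i]:  # check if the combination is valid i.e; chosen two wheels and 4 wheels are in limit of number of wheels
--                 count += 1
--         result.append(count)
--     return result
-- ===== SOURCE B (Python) =====
-- def chooseFleets(wheels):
--     # Closed form: 2t+4f = w has a solution iff w is even and nonnegative,
--     # and then t can be w//2, w//2-2, ..., giving w//4 + 1 choices.
--     return [w // 4 + 1 if w >= 0 and w % 2 == 0 else 0 for w in wheels]
-- ===== Notes on version B (the rewrite author's own statement) =====
-- stated objective: faster
-- what changed: Replaces the inner loop over all candidate two-wheeler counts with the closed-form count w//4+1 for even nonnegative w (else 0).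
import Mathlib
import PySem

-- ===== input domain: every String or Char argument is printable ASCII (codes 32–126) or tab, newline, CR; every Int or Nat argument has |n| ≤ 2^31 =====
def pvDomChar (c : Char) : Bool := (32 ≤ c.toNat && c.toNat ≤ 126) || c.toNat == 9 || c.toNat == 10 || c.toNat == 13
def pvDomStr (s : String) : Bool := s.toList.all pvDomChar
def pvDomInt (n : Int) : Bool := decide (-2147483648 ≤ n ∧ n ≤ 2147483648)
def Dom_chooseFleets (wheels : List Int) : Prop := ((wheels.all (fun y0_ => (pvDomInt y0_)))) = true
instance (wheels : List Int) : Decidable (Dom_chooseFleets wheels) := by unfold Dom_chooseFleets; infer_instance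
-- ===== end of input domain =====

-- B replaces A's inner loop over candidate two-wheeler counts with a closed-form count per wheel.

-- ===== PORT A =====
-- inner loop of A for one wheel count w: count valid numbers of two-wheelers
def chooseFleetsCount (w : Int) : Int :=
  let x := PySem.Int.floordiv w 2 + 1
  (PySem.List.pyRange 0 x 1).foldl (fun count j =>
    let twowheeled := j
    let fourwheeled := PySem.Int.floordiv (w - j * 2) 4
    if 2 * twowheeled + 4 * fourwheeled = w then count + 1 else count) 0

def chooseFleets (wheels : List Int) : List Int :=
  wheels.foldl (fun result w => result ++ [chooseFleetsCount w]) []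

-- ===== PORT B =====
def chooseFleets_alt (wheels : List Int) : List Int :=
  wheels.map (fun w =>
    if 0 ≤ w ∧ PySem.Int.mod w 2 = 0 then PySem.Int.floordiv w 4 + 1 else 0)

-- ===== PRECONDITION & SPEC =====
def Spec_chooseFleets (wheels : List Int) (out : List Int) : Prop := out = chooseFleets_alt wheels
instance (wheels : List Int) (out : List Int) : Decidable (Spec_chooseFleets wheels out) := by unfold Spec_chooseFleets; infer_instance

-- ===== CLAIM (what is proved, stated in full; the proofs are below) =====
def Claim_equal_chooseFleets : Prop := ∀ (wheels : List Int), Dom_chooseFleets wheels → Spec_chooseFleets wheels (chooseFleets wheels)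

-- ===== LEMMAS AND PROOFS =====

-- closed form for the number of j < n with 4 ∣ (w - 2j)
def cntF (w : Int) (n : Nat) : Int :=
  if w % 2 = 0 then (if w % 4 = 0 then (((n + 1) / 2 : Nat) : Int) else ((n / 2 : Nat) : Int)) else 0

lemma cntF_step (w : Int) (n : Nat) :
    cntF w (n + 1) = cntF w n + (if 2 * (n : Int) + 4 * ((w - (n : Int) * 2) / 4) = w then 1 else 0) := by
  unfold cntF
  split_ifs <;> push_cast <;> omega

lemma loop_eq (w : Int) : ∀ (n : Nat) (acc : Int),
    (PySem.List.pyRange 0 (n : Int) 1).foldl (fun count j =>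
      if 2 * j + 4 * PySem.Int.floordiv (w - j * 2) 4 = w then count + 1 else count) acc
    = acc + cntF w n := by
  intro n
  induction n with
  | zero =>
    intro acc
    simp [PySem.List.pyRange_one_eq_nil, cntF]
  | succ n ih =>
    intro acc
    have h : PySem.List.pyRange 0 ((n : Int) + 1) 1
        = PySem.List.pyRange 0 (n : Int) 1 ++ [(n : Int)] := by
      exact PySem.List.pyRange_one_succ_right (by positivity)
    have hcast : (((n : Nat) + 1 : Nat) : Int) = (n : Int) + 1 := by push_cast; ring
    rw [hcast, h, List.foldl_append, ih]
    simp only [List.foldl_cons, List.foldl_nil]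
    rw [cntF_step]
    have h4 : PySem.Int.floordiv (w - (n : Int) * 2) 4 = (w - (n : Int) * 2) / 4 :=
      PySem.Int.floordiv_eq_ediv_of_pos (by norm_num)
    rw [h4]
    split_ifs <;> omega

lemma count_closed (w : Int) :
    chooseFleetsCount w = if 0 ≤ w ∧ PySem.Int.mod w 2 = 0 then PySem.Int.floordiv w 4 + 1 else 0 := by
  unfold chooseFleetsCount
  have h2 : PySem.Int.floordiv w 2 = w / 2 := PySem.Int.floordiv_eq_ediv_of_pos (by norm_num)
  have h4 : PySem.Int.floordiv w 4 = w / 4 := PySem.Int.floordiv_eq_ediv_of_pos (by norm_num)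
  have hm : PySem.Int.mod w 2 = w % 2 := PySem.Int.mod_eq_emod_of_pos (by norm_num)
  simp only [h2, h4, hm]
  by_cases hw : 0 ≤ w
  · have hx : (((w / 2 + 1).toNat : Nat) : Int) = w / 2 + 1 := by omega
    rw [← hx, loop_eq w]
    unfold cntF
    split_ifs <;> push_cast <;> omega
  · have hnil : PySem.List.pyRange 0 (w / 2 + 1) 1 = [] :=
      PySem.List.pyRange_one_eq_nil (by omega)
    rw [hnil]
    simp [hw]

lemma foldl_append_map (g : Int → Int) : ∀ (l : List Int) (acc : List Int),
    l.foldl (fun r w => r ++ [g w]) acc = acc ++ l.map g := by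
  intro l
  induction l with
  | nil => simp
  | cons x xs ih => intro acc; simp [ih]

-- ===== VERDICT (by name: the statement is the Claim_ definition above) =====
theorem chooseFleets_spec : Claim_equal_chooseFleets := by
  intro wheels _
  unfold Spec_chooseFleets chooseFleets chooseFleets_alt
  rw [foldl_append_map chooseFleetsCount wheels []]
  simp only [List.nil_append]
  exact List.map_congr_left (fun w _ => count_closed w)
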